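-- pv_equiv track=rewrite | github.com/srcsdk/newk | opml.py | generate_opml
-- ===== SOURCE A (Python) =====
-- def generate_opml(feeds, title="feed subscriptions"):
--     """generate opml xml from list of feed dicts."""
--     lines = [
--         '<?xml version="1.0" encoding="UTF-8"?>',
--         '<opml version="2.0">',
--         '  <head>',
--         f'    <title>{title}</title>',
--         '  </head>',
--         '  <body>',
--     ]
--     by_category = {}
--     for feed in feeds:
--         cat = feed.get("category", "uncategorized")
--         by_category.setdefault(cat, []).append(feed)
--     for cat, cat_feeds in sorted(by_category.items()):
--         lines.append(f'    <outline text="{cat}">')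
--         for f in cat_feeds:
--             lines.append(
--                 f'      <outline text="{f["title"]}" '
--                 f'xmlUrl="{f["url"]}" '
--                 f'htmlUrl="{f.get("html_url", "")}" />'
--             )
--         lines.append('    </outline>')
--     lines.append('  </body>')
--     lines.append('</opml>')
--     return "\n".join(lines)
-- ===== SOURCE B (Python) =====
-- def generate_opml(feeds, title="feed subscriptions"):
--     """generate opml xml from list of feed dicts."""
--     def cat_of(f):
--         return f.get("category", "uncategorized")
--
--     def feed_line(f):
--         return (f'      <outline text="{f["title"]}" '
--                 f'xmlUrl="{f["url"]}" '
--                 f'htmlUrl="{f.get("html_url", "")}" />')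
--
--     def block(cat):
--         return ([f'    <outline text="{cat}">']
--                 + [feed_line(f) for f in feeds if cat_of(f) == cat]
--                 + ['    </outline>'])
--
--     header = [
--         '<?xml version="1.0" encoding="UTF-8"?>',
--         '<opml version="2.0">',
--         '  <head>',
--         f'    <title>{title}</title>',
--         '  </head>',
--         '  <body>',
--     ]
--     body = [line for cat in sorted({cat_of(f) for f in feeds}) for line in block(cat)]
--     return "\n".join(header + body + ['  </body>', '</opml>'])
-- ===== Notes on version B (the rewrite author's own statement) =====
-- stated objective: simpler
-- what changed: B drops A's incrementally-built by_category dict and A's append-accumulator loops entirely: it sorts the distinct categories once, builds each category's block as a pure list expression (literal + filtered comprehension + literal), and concatenates header + flattened blocks + footer in one join.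
import Mathlib
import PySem

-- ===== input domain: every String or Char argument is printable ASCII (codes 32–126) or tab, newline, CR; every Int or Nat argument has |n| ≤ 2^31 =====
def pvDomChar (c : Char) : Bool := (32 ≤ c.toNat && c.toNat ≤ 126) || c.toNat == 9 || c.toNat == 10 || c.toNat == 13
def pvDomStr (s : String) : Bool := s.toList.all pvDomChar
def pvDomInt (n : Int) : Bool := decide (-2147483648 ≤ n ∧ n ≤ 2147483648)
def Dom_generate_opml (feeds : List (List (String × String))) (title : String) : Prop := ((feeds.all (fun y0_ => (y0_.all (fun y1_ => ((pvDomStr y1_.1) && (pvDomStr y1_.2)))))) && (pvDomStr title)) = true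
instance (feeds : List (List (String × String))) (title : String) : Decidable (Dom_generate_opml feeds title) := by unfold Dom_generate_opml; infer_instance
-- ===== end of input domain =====

-- B drops A's by_category dict and its append-accumulator loops: it sorts the distinct
-- categories once and builds the document as header ++ flattened per-category blocks
-- (each a pure list expression over a filter) ++ footer (objective: simpler).

-- ===== PORT A =====
-- f.get(k, dflt) / f[k] on a feed dict: the feed association list as a Python dict
-- (PySem.Dict.ofList = dict(pairs): last duplicate wins, first position kept).
def pvA_catOf (f : List (String × String)) : String :=
  (PySem.Dict.ofList f).getD "category" "uncategorized"

-- the f-string line for one feed (both Pythons build the identical line, A inline, B in its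
-- feed_line helper); f["title"] / f["url"] raise KeyError when absent — excluded by
-- Pre_generate_opml, so .getD "" is never reached there
def pvA_feedLine (f : List (String × String)) : String :=
  "      <outline text=\"" ++ (((PySem.Dict.ofList f).get? "title").getD "") ++
  "\" xmlUrl=\"" ++ (((PySem.Dict.ofList f).get? "url").getD "") ++
  "\" htmlUrl=\"" ++ ((PySem.Dict.ofList f).getD "html_url" "") ++ "\" />"

def generate_opml (feeds : List (List (String × String))) (title : String) : String :=
  let lines : List String :=
    ["<?xml version=\"1.0\" encoding=\"UTF-8\"?>",
     "<opml version=\"2.0\">",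
     "  <head>",
     "    <title>" ++ title ++ "</title>",
     "  </head>",
     "  <body>"]
  let by_category : PySem.Dict String (List (List (String × String))) :=
    feeds.foldl (fun d feed => d.modify (pvA_catOf feed) [] (fun v => v ++ [feed]))
      PySem.Dict.empty
  -- sorted(by_category.items()) compares the (key, value) tuples; the dict's keys are
  -- distinct, so Python's tuple order coincides with ordering by the key alone — exact here
  let lines := (PySem.List.sorted by_category.items (fun p => p.1)).foldl
    (fun lines p =>
      let lines := lines ++ ["    <outline text=\"" ++ p.1 ++ "\">"]
      let lines := p.2.foldl (fun lines f => lines ++ [pvA_feedLine f]) lines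
      lines ++ ["    </outline>"]) lines
  let lines := lines ++ ["  </body>"]
  let lines := lines ++ ["</opml>"]
  PySem.Str.join "\n" lines

-- ===== PORT B =====
-- block(cat): one category's lines as a pure list expression (literal + comprehension + literal)
def pvB_block (feeds : List (List (String × String))) (cat : String) : List String :=
  ["    <outline text=\"" ++ cat ++ "\">"]
  ++ (feeds.filter (fun f => pvA_catOf f == cat)).map pvA_feedLine
  ++ ["    </outline>"]

def generate_opml_alt (feeds : List (List (String × String))) (title : String) : String :=
  let header : List String :=
    ["<?xml version=\"1.0\" encoding=\"UTF-8\"?>",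
     "<opml version=\"2.0\">",
     "  <head>",
     "    <title>" ++ title ++ "</title>",
     "  </head>",
     "  <body>"]
  -- [line for cat in sorted({cat_of(f) for f in feeds}) for line in block(cat)]
  let body :=
    (PySem.List.sorted (PySem.Set.ofList (feeds.map pvA_catOf)) (fun c => c)).flatMap
      (pvB_block feeds)
  PySem.Str.join "\n" (header ++ body ++ ["  </body>", "</opml>"])

-- ===== PRECONDITION & SPEC =====
-- exactly where Python A returns: f["title"] / f["url"] raise KeyError on a feed missing either key
def Pre_generate_opml (feeds : List (List (String × String))) (title : String) : Prop :=
  ∀ f ∈ feeds, (PySem.Dict.ofList f).contains "title" = true ∧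
               (PySem.Dict.ofList f).contains "url" = true
instance (feeds : List (List (String × String))) (title : String) : Decidable (Pre_generate_opml feeds title) := by unfold Pre_generate_opml; infer_instance
def pvWitness_generate_opml : (List (List (String × String))) × String :=
  ([[("title", "t"), ("url", "u")], [("title", "s"), ("url", "v"), ("category", "news")]], "subs")

def Spec_generate_opml (feeds : List (List (String × String))) (title : String) (out : String) : Prop := out = generate_opml_alt feeds title
instance (feeds : List (List (String × String))) (title : String) (out : String) : Decidable (Spec_generate_opml feeds title out) := by unfold Spec_generate_opml; infer_instance

-- ===== CLAIM (what is proved, stated in full; the proofs are below) =====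
def Claim_equal_generate_opml : Prop := ∀ (feeds : List (List (String × String))) (title : String), Dom_generate_opml feeds title → Pre_generate_opml feeds title → Spec_generate_opml feeds title (generate_opml feeds title)

-- ===== LEMMAS AND PROOFS =====

-- the grouping dict's value at c is exactly the feeds of category c, in input order
theorem pv_groupdict_getD (feeds : List (List (String × String))) (c : String) :
    (feeds.foldl (fun d feed => d.modify (pvA_catOf feed) [] (fun v => v ++ [feed]))
      (PySem.Dict.empty : PySem.Dict String (List (List (String × String))))).getD c []
    = feeds.filter (fun f => pvA_catOf f == c) := by
  have h := PySem.Dict.getD_foldl_modify_append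
    (feeds.map (fun f => (pvA_catOf f, f)))
    (PySem.Dict.empty : PySem.Dict String (List (List (String × String)))) c
  rw [List.foldl_map] at h
  simpa [List.filter_map, List.map_map, Function.comp_def] using h

theorem pv_groupdict_keys (feeds : List (List (String × String))) :
    (feeds.foldl (fun d feed => d.modify (pvA_catOf feed) [] (fun v => v ++ [feed]))
      (PySem.Dict.empty : PySem.Dict String (List (List (String × String))))).keys
    = PySem.Set.ofList (feeds.map pvA_catOf) := by
  rw [PySem.Dict.keys_foldl_modify_key feeds pvA_catOf [] (fun _ feed => fun v => v ++ [feed])]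
  simp [PySem.Set.ofList, PySem.Set.update, PySem.Dict.keys_empty]

theorem pv_groupdict_nodup (feeds : List (List (String × String))) :
    (feeds.foldl (fun d feed => d.modify (pvA_catOf feed) [] (fun v => v ++ [feed]))
      (PySem.Dict.empty : PySem.Dict String (List (List (String × String))))).keys.Nodup := by
  exact PySem.Dict.nodup_keys_foldl_modify_key feeds pvA_catOf [] _ _ (by simp [PySem.Dict.keys_empty])

-- sorted(by_category.items()) = the sorted distinct categories, each paired with its filter
theorem pv_sorted_items (feeds : List (List (String × String))) :
    PySem.List.sorted
      ((feeds.foldl (fun d feed => d.modify (pvA_catOf feed) [] (fun v => v ++ [feed]))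
        (PySem.Dict.empty : PySem.Dict String (List (List (String × String))))).items)
      (fun p => p.1)
    = (PySem.List.sorted (PySem.Set.ofList (feeds.map pvA_catOf)) (fun c => c)).map
        (fun c => (c, feeds.filter (fun f => pvA_catOf f == c))) := by
  set d := feeds.foldl (fun d feed => d.modify (pvA_catOf feed) [] (fun v => v ++ [feed]))
      (PySem.Dict.empty : PySem.Dict String (List (List (String × String)))) with hd
  have hitems : d.items = (PySem.Set.ofList (feeds.map pvA_catOf)).map
      (fun c => (c, feeds.filter (fun f => pvA_catOf f == c))) := by
    rw [PySem.Dict.items_eq_map_keys d (pv_groupdict_nodup feeds) [], pv_groupdict_keys]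
    refine List.map_congr_left (fun c hc => ?_)
    rw [hd, pv_groupdict_getD]
  apply PySem.List.sorted_eq_of_perm_of_pairwise_lt
  · rw [hitems]
    exact ((PySem.List.sorted_perm _ _ _).map _)
  · rw [List.pairwise_map]
    exact PySem.List.sorted_ofList_pairwise_lt (feeds.map pvA_catOf)

-- A's outer accumulator loop over the sorted items is one flatMap of per-category blocks
theorem pv_A_loop_flatMap (feeds : List (List (String × String))) (acc : List String) :
    ((PySem.List.sorted (PySem.Set.ofList (feeds.map pvA_catOf)) (fun c => c)).map
        (fun c => (c, feeds.filter (fun f => pvA_catOf f == c)))).foldl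
      (fun lines p =>
        (lines ++ ["    <outline text=\"" ++ p.1 ++ "\">"]
          |> p.2.foldl (fun lines f => lines ++ [pvA_feedLine f]))
        ++ ["    </outline>"]) acc
    = acc ++ (PySem.List.sorted (PySem.Set.ofList (feeds.map pvA_catOf)) (fun c => c)).flatMap
        (pvB_block feeds) := by
  rw [List.foldl_map]
  have hbody : ∀ (lines : List String) (c : String),
      (lines ++ ["    <outline text=\"" ++ c ++ "\">"]
        |> (feeds.filter (fun f => pvA_catOf f == c)).foldl
             (fun lines f => lines ++ [pvA_feedLine f]))
      ++ ["    </outline>"]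
      = lines ++ pvB_block feeds c := by
    intro lines c
    rw [PySem.List.foldl_append_singleton_eq_map]
    simp [pvB_block]
  calc (PySem.List.sorted (PySem.Set.ofList (feeds.map pvA_catOf)) (fun c => c)).foldl
        (fun lines c =>
          (lines ++ ["    <outline text=\"" ++ c ++ "\">"]
            |> (feeds.filter (fun f => pvA_catOf f == c)).foldl
                 (fun lines f => lines ++ [pvA_feedLine f]))
          ++ ["    </outline>"]) acc
      = (PySem.List.sorted (PySem.Set.ofList (feeds.map pvA_catOf)) (fun c => c)).foldl
        (fun lines c => lines ++ pvB_block feeds c) acc := by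
        congr 1
        exact funext fun lines => funext fun c => hbody lines c
    _ = _ := PySem.List.foldl_append_eq_flatMap _ _ _

-- ===== VERDICT (by name: the statement is the Claim_ definition above) =====
theorem generate_opml_spec : Claim_equal_generate_opml := by
  intro feeds title _ _
  show generate_opml feeds title = generate_opml_alt feeds title
  simp only [generate_opml, generate_opml_alt, pv_sorted_items]
  rw [show ∀ (a b : List String), a = b → PySem.Str.join "\n" a = PySem.Str.join "\n" b
        from fun a b h => by rw [h]]
  rw [pv_A_loop_flatMap]
  simp [List.append_assoc]
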